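-- pv_equiv track=rewrite | github.com/kangchaehong/sw_python | 02. Implementation/Q09.py | solution
-- ===== SOURCE A (Python) =====
-- def solution(s):
--     length = len(s)
--     max = length // 2
--     cnt = 1
--     answerl = ''
--     for i in range(max,0,-1):
--         if s[:i] == s[i:2*i] :
--             cut = i
--             break
--         else :
--             cut = length
--
--     if cut == length :
--         answer = length
--         return answer
--
--     if length % cut == 0 :
--         circle = (length // cut)-1
--     else :
--         circle = (length // cut)
--
--     for j in range(1,circle+1):
--         r = j*cut
--         if s[r-cut:r] == s[r:r+cut] :
--             cnt += 1
--             word = s[r-cut:r]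
--         else :
--             if cnt == 1 :
--                 answerl = answerl + s[r-cut:r]
--                 continue
--             answerl = answerl + str(cnt) + word
--             cnt = 1
--         if j == circle :
--             answerl = answerl + str(cnt) + word
--
--     if length % cut != 0:
--         answerl = answerl + s[-(length % cut):]
--
--     answer = len(answerl)
--     return answer
-- ===== SOURCE B (Python) =====
-- def solution(s):
--     n = len(s)
--     # Z-function: z[i] = length of the longest common prefix of s and s[i:]
--     z = [0] * n
--     l = r = 0
--     for i in range(1, n):
--         k = min(r - i, z[i - l]) if i < r else 0
--         while i + k < n and s[k] == s[i + k]: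
--             k += 1
--         z[i] = k
--         if i + k > r:
--             l, r = i, i + k
--     # largest block size whose prefix immediately repeats
--     cut = 0
--     for i in range(1, n // 2 + 1):
--         if z[i] >= i:
--             cut = i
--     if cut == 0:
--         return n
--     # run-length-encode the full blocks; the leftover tail stays as is
--     m = n // cut
--     total = n % cut
--     run = 1
--     for j in range(1, m):
--         if s[j * cut:(j + 1) * cut] == s[(j - 1) * cut:j * cut]:
--             run += 1
--         else:
--             total += cut + (len(str(run)) if run > 1 else 0)
--             run = 1
--     total += cut + (len(str(run)) if run > 1 else 0)
--     return total
-- ===== Notes on version B (the rewrite author's own statement) =====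
-- stated objective: alternative
-- what changed: B finds the largest immediately-repeating prefix block via the linear-time Z-function (largest i with z[i] >= i) instead of A's descending quadratic slice-comparison search, then computes the compressed length arithmetically with a plain run-length pass over the blocks instead of A's string-building loop with its stale-word final flush.
-- intended difference: When the last two full blocks differ and the block size divides len(s), or the last two full blocks are equal and it does not, A's final flush appends a stale str(cnt)+word (or drops the last block), returning a length off by +1, -cut or +1+cut; B returns the true compressed length, which is what the task intends. — e.g. on solution("aaab"): A returns 4, B returns 3
import Mathlib
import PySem

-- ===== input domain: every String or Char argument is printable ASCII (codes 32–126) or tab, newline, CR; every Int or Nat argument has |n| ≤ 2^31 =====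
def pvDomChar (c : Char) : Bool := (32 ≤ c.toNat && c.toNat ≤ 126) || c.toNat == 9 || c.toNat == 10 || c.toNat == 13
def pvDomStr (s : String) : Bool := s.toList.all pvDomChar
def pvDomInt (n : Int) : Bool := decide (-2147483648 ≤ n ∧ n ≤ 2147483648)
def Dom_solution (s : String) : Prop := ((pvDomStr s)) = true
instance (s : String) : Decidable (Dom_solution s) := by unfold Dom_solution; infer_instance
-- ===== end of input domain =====

-- B finds the repeated-block size with the linear-time Z-function and computes the compressed
-- length by a plain arithmetic run-length pass (objective: alternative); outside D_solution the
-- return values are proved equal, inside D_solution A's stale final flush is off and B is intended.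

-- ===== PORT A =====
-- first loop of A: for i in range(max,0,-1): if s[:i]==s[i:2*i]: cut=i; break; else: cut=length
def pvA_cutLoop (cs : List Char) (length : Int) : List Int → Int
  | [] => length
  | i :: rest =>
    if PySem.List.slice cs none (some i) == PySem.List.slice cs (some i) (some (2 * i)) then i
    else pvA_cutLoop cs length rest

-- body of A's second loop (state: cnt, answerl, word)
def pvA_step (cs : List Char) (cut circle : Int) (st : Int × List Char × List Char) (j : Int) :
    Int × List Char × List Char :=
  let cnt := st.1
  let answerl := st.2.1
  let word := st.2.2
  let r := j * cut
  if PySem.List.slice cs (some (r - cut)) (some r) == PySem.List.slice cs (some r) (some (r + cut)) then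
    let cnt := cnt + 1
    let word := PySem.List.slice cs (some (r - cut)) (some r)
    if j == circle then (cnt, answerl ++ PySem.Int.toChars cnt ++ word, word)
    else (cnt, answerl, word)
  else
    if cnt == 1 then
      -- 'continue': the j == circle check is skipped
      (cnt, answerl ++ PySem.List.slice cs (some (r - cut)) (some r), word)
    else
      let answerl := answerl ++ PySem.Int.toChars cnt ++ word
      let cnt : Int := 1
      if j == circle then (cnt, answerl ++ PySem.Int.toChars cnt ++ word, word)
      else (cnt, answerl, word)

def solution (s : String) : Int :=
  let cs := s.toList
  let length : Int := PySem.Str.len s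
  let mx := PySem.Int.floordiv length 2
  let cut := pvA_cutLoop cs length (PySem.List.pyRange mx 0 (-1))
  if cut == length then length
  else
    let circle := if PySem.Int.mod length cut == 0 then PySem.Int.floordiv length cut - 1
                  else PySem.Int.floordiv length cut
    let st := (PySem.List.pyRange 1 (circle + 1) 1).foldl (pvA_step cs cut circle) (1, [], [])
    let answerl := if PySem.Int.mod length cut ≠ 0 then
        st.2.1 ++ PySem.List.slice cs (some (-(PySem.Int.mod length cut))) none
      else st.2.1
    (answerl.length : Int)

-- ===== PORT B =====
-- the Z-function's inner while loop: extend the match length k while s[k] == s[i+k];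
-- the fuel only makes the recursion structural (the loop runs at most n - i times);
-- getD with .toNat is exact here: 0 ≤ k and i + k < n hold whenever the characters are read
def pvZext (cs : List Char) (n i : Int) : Nat → Int → Int
  | 0, k => k
  | fuel + 1, k =>
    if i + k < n ∧ cs.getD k.toNat 'a' = cs.getD (i + k).toNat 'a' then
      pvZext cs n i fuel (k + 1)
    else k

-- one iteration of the Z-function loop over i; state (z, l, r)
def pvZstep (cs : List Char) (n : Int) (st : List Int × Int × Int) (i : Int) : List Int × Int × Int :=
  let z := st.1
  let l := st.2.1
  let r := st.2.2
  let k0 : Int := if i < r then min (r - i) (z.getD (i - l).toNat 0) else 0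
  let k := pvZext cs n i n.toNat k0
  let z' := z.set i.toNat k
  if i + k > r then (z', i, i + k) else (z', l, r)

-- len(str(run))
def pvBdl (k : Int) : Int := ((PySem.Int.toChars k).length : Int)

-- body of B's run-length loop; state (total, run)
def pvBrle (cs : List Char) (cut : Int) (st : Int × Int) (j : Int) : Int × Int :=
  if PySem.List.slice cs (some (j * cut)) (some ((j + 1) * cut)) =
      PySem.List.slice cs (some ((j - 1) * cut)) (some (j * cut)) then
    (st.1, st.2 + 1)
  else
    (st.1 + cut + (if st.2 > 1 then pvBdl st.2 else 0), 1)

def solution_alt (s : String) : Int :=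
  let cs := s.toList
  let n : Int := PySem.Str.len s
  let z := ((PySem.List.pyRange 1 n 1).foldl (pvZstep cs n) (List.replicate n.toNat 0, 0, 0)).1
  let cut := (PySem.List.pyRange 1 (PySem.Int.floordiv n 2 + 1) 1).foldl
      (fun c i => if z.getD i.toNat 0 ≥ i then i else c) 0
  if cut == 0 then n
  else
    let m := PySem.Int.floordiv n cut
    let st := (PySem.List.pyRange 1 m 1).foldl (pvBrle cs cut) (PySem.Int.mod n cut, 1)
    st.1 + cut + (if st.2 > 1 then pvBdl st.2 else 0)

-- ===== PRECONDITION & SPEC =====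
-- Pre_ excludes only strings of length < 2, on which A raises UnboundLocalError ('cut' never assigned).
def Pre_solution (s : String) : Prop := 2 ≤ s.toList.length
instance (s : String) : Decidable (Pre_solution s) := by unfold Pre_solution; infer_instance
def pvWitness_solution : String := "aabb"

-- the largest block size c ≤ n/2 whose length-c prefix immediately repeats (0 if none)
def pvCut (cs : List Char) : Nat :=
  ((List.range (cs.length / 2 + 1)).filter
    (fun i => decide (0 < i ∧ cs.take i = (cs.drop i).take i))).foldr max 0

-- block j of cs when chopped into blocks of size c
def pvPieceN (cs : List Char) (c j : Nat) : List Char := (cs.drop (j * c)).take c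

-- On strings whose block size c = pvCut divides len(s) with the last two blocks different, or does
-- not divide it with the last two full blocks equal, A's final flush appends a stale str(cnt)+word
-- (or drops the last block) and returns a length off by +1, -c or +1+c; B returns the true
-- compressed length, which is what the task intends.
def D_solution (s : String) : Prop :=
  let cs := s.toList
  let c := pvCut cs
  c ≠ 0 ∧
    ((cs.length % c = 0 ∧ pvPieceN cs c (cs.length / c - 2) ≠ pvPieceN cs c (cs.length / c - 1)) ∨
     (cs.length % c ≠ 0 ∧ pvPieceN cs c (cs.length / c - 2) = pvPieceN cs c (cs.length / c - 1)))
instance (s : String) : Decidable (D_solution s) := by unfold D_solution; infer_instance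

def pvDiffWitness_solution : String := "aaab"
def pvDiffWitnessOut_solution : Int × Int := (4, 3)

def Spec_solution (s : String) (out : Int) : Prop := ¬ D_solution s → out = solution_alt s
instance (s : String) (out : Int) : Decidable (Spec_solution s out) := by unfold Spec_solution; infer_instance

-- ===== CLAIM (what is proved, stated in full; the proofs are below) =====
def Claim_unchanged_solution : Prop := ∀ (s : String), Dom_solution s → Pre_solution s → Spec_solution s (solution s)
def Claim_changed_solution : Prop := Dom_solution (pvDiffWitness_solution) ∧ Pre_solution (pvDiffWitness_solution) ∧ D_solution (pvDiffWitness_solution) ∧ solution (pvDiffWitness_solution) = pvDiffWitnessOut_solution.1 ∧ solution_alt (pvDiffWitness_solution) = pvDiffWitnessOut_solution.2 ∧ pvDiffWitnessOut_solution.1 ≠ pvDiffWitnessOut_solution.2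
def Claim_exact_solution : Prop := ∀ (s : String), Dom_solution s → Pre_solution s → D_solution s → solution s ≠ solution_alt s

-- ===== LEMMAS AND PROOFS =====
-- longest common prefix length of two character lists
def pvLcp : List Char → List Char → Nat
  | a :: as, b :: bs => if a = b then pvLcp as bs + 1 else 0
  | _, _ => 0

lemma pvLcp_le_left : ∀ (a b : List Char), pvLcp a b ≤ a.length
  | [], _ => by simp [pvLcp]
  | _ :: _, [] => by simp [pvLcp]
  | a :: as, b :: bs => by
    simp only [pvLcp, List.length_cons]
    split
    · exact Nat.succ_le_succ (pvLcp_le_left as bs)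
    · omega

lemma pvLcp_le_right : ∀ (a b : List Char), pvLcp a b ≤ b.length
  | [], _ => by simp [pvLcp]
  | _ :: _, [] => by simp [pvLcp]
  | a :: as, b :: bs => by
    simp only [pvLcp, List.length_cons]
    split
    · exact Nat.succ_le_succ (pvLcp_le_right as bs)
    · omega

lemma pvLcp_ge_iff : ∀ (t : Nat) (a b : List Char),
    t ≤ pvLcp a b ↔ (t ≤ a.length ∧ t ≤ b.length ∧ a.take t = b.take t) := by
  intro t
  induction t with
  | zero => intro a b; simp
  | succ t ih =>
    intro a b
    match a, b with
    | [], b => simp [pvLcp]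
    | a :: as, [] => simp [pvLcp]
    | a :: as, b :: bs =>
      simp only [pvLcp, List.length_cons, List.take_succ_cons]
      by_cases hab : a = b
      · subst hab
        rw [if_pos rfl]
        constructor
        · intro h
          have := (ih as bs).1 (by omega)
          exact ⟨by omega, by omega, by rw [this.2.2]⟩
        · intro ⟨h1, h2, h3⟩
          have h3' : as.take t = bs.take t := by simpa using h3
          have := (ih as bs).2 ⟨by omega, by omega, h3'⟩
          omega
      · rw [if_neg hab]
        constructor
        · omega
        · intro ⟨h1, h2, h3⟩
          have : a = b ∧ as.take t = bs.take t := by simpa using h3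
          exact absurd this.1 hab

lemma pvLcp_take (a b : List Char) : a.take (pvLcp a b) = b.take (pvLcp a b) :=
  ((pvLcp_ge_iff _ a b).1 le_rfl).2.2

lemma pvLcp_getD_lt (a b : List Char) (d : Char) (k : Nat) (h : k < pvLcp a b) :
    a.getD k d = b.getD k d := by
  have h1 : k < a.length := lt_of_lt_of_le h (pvLcp_le_left a b)
  have h2 : k < b.length := lt_of_lt_of_le h (pvLcp_le_right a b)
  have ht := pvLcp_take a b
  have : (a.take (pvLcp a b)).getD k d = (b.take (pvLcp a b)).getD k d := by rw [ht]
  rwa [List.getD_eq_getElem _ _ (by simpa using ⟨h, h1⟩),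
       List.getD_eq_getElem _ _ (by simpa using ⟨h, h2⟩),
       List.getElem_take, List.getElem_take,
       ← List.getD_eq_getElem a d h1, ← List.getD_eq_getElem b d h2] at this

lemma pvLcp_getD_ne (a b : List Char) (d : Char)
    (h1 : pvLcp a b < a.length) (h2 : pvLcp a b < b.length) :
    a.getD (pvLcp a b) d ≠ b.getD (pvLcp a b) d := by
  intro heq
  have : pvLcp a b + 1 ≤ pvLcp a b := by
    apply (pvLcp_ge_iff (pvLcp a b + 1) a b).2
    refine ⟨by omega, by omega, ?_⟩
    rw [List.take_add_one, List.take_add_one, pvLcp_take a b]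
    congr 1
    rw [List.getElem?_eq_getElem h1, List.getElem?_eq_getElem h2]
    rw [List.getD_eq_getElem a d h1, List.getD_eq_getElem b d h2] at heq
    simp [heq]
  omega

lemma pvZext_eq (cs : List Char) (i : Int) (hi1 : 1 ≤ i) (hin : i ≤ (cs.length : Int)) :
    ∀ (fuel : Nat) (k : Int), 0 ≤ k → k.toNat ≤ pvLcp cs (cs.drop i.toNat) →
      pvLcp cs (cs.drop i.toNat) - k.toNat ≤ fuel →
      pvZext cs (cs.length : Int) i fuel k = (pvLcp cs (cs.drop i.toNat) : Int) := by
  set L := pvLcp cs (cs.drop i.toNat) with hL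
  have hLlen : L ≤ cs.length - i.toNat := by
    have := pvLcp_le_right cs (cs.drop i.toNat)
    simpa [← hL] using this
  intro fuel
  induction fuel with
  | zero =>
    intro k hk0 hkL hf
    have : k.toNat = L := by omega
    simp only [pvZext]
    omega
  | succ fuel ih =>
    intro k hk0 hkL hf
    by_cases hkeq : k.toNat = L
    · -- the loop stops: either the end of the string or a mismatch
      simp only [pvZext]
      rw [if_neg ?_]
      · omega
      · rintro ⟨hlt, heq⟩
        have hkn : k.toNat < cs.length - i.toNat := by omega
        have hgd : (cs.drop i.toNat).getD k.toNat 'a' = cs.getD (i + k).toNat 'a' := by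
          rw [List.getD_eq_getElem?_getD, List.getD_eq_getElem?_getD, List.getElem?_drop]
          congr 2
          omega
        have := pvLcp_getD_ne cs (cs.drop i.toNat) 'a' (by omega)
          (by simp only [List.length_drop]; omega)
        rw [← hL] at this
        exact this (by rw [← hkeq, heq, hgd])
    · -- one more step
      have hklt : k.toNat < L := by omega
      have hgd : (cs.drop i.toNat).getD k.toNat 'a' = cs.getD (i + k).toNat 'a' := by
        rw [List.getD_eq_getElem?_getD, List.getD_eq_getElem?_getD, List.getElem?_drop]
        congr 2
        omega
      have hchar : cs.getD k.toNat 'a' = cs.getD (i + k).toNat 'a' := by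
        rw [← hgd]
        exact pvLcp_getD_lt cs (cs.drop i.toNat) 'a' k.toNat hklt
      simp only [pvZext]
      rw [if_pos ⟨by omega, hchar⟩]
      exact ih (k + 1) (by omega) (by omega) (by omega)

lemma pvZ_memo (cs : List Char) (lN iN t : Nat)
    (hl1 : 1 ≤ lN) (hli : lN < iN)
    (ht1 : iN + t ≤ lN + pvLcp cs (cs.drop lN))
    (ht2 : t ≤ pvLcp cs (cs.drop (iN - lN))) :
    t ≤ pvLcp cs (cs.drop iN) := by
  have hLl : pvLcp cs (cs.drop lN) ≤ cs.length - lN := by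
    have := pvLcp_le_right cs (cs.drop lN); simpa using this
  apply (pvLcp_ge_iff t cs (cs.drop iN)).2
  refine ⟨?_, ?_, ?_⟩
  · have := pvLcp_le_left cs (cs.drop (iN - lN)); omega
  · simp only [List.length_drop]; omega
  · have A1 : cs.take t = (cs.drop (iN - lN)).take t :=
      ((pvLcp_ge_iff t cs (cs.drop (iN - lN))).1 ht2).2.2
    have A2 : cs.take (pvLcp cs (cs.drop lN)) = (cs.drop lN).take (pvLcp cs (cs.drop lN)) :=
      pvLcp_take _ _
    have hle : iN - lN + t ≤ pvLcp cs (cs.drop lN) := by omega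
    have key : cs.take (iN - lN + t) = (cs.drop lN).take (iN - lN + t) := by
      calc cs.take (iN - lN + t) = (cs.take (pvLcp cs (cs.drop lN))).take (iN - lN + t) := by
            rw [List.take_take, min_eq_left hle]
        _ = ((cs.drop lN).take (pvLcp cs (cs.drop lN))).take (iN - lN + t) := by rw [A2]
        _ = (cs.drop lN).take (iN - lN + t) := by rw [List.take_take, min_eq_left hle]
    calc cs.take t = (cs.drop (iN - lN)).take t := A1
      _ = (cs.take (iN - lN + t)).drop (iN - lN) := by
            rw [List.drop_take]
            have h : iN - lN + t - (iN - lN) = t := by omega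
            rw [h]
      _ = ((cs.drop lN).take (iN - lN + t)).drop (iN - lN) := by rw [key]
      _ = ((cs.drop lN).drop (iN - lN)).take t := by
            rw [List.drop_take]
            have h : iN - lN + t - (iN - lN) = t := by omega
            rw [h]
      _ = (cs.drop iN).take t := by
            rw [List.drop_drop]
            have h : lN + (iN - lN) = iN := by omega
            rw [h]

-- loop invariant for the Z-function fold
def pvZinv (cs : List Char) (i : Int) (z : List Int) (l r : Int) : Prop :=
  z.length = cs.length ∧
  (∀ j : Nat, 1 ≤ j → (j : Int) < i → z.getD j 0 = (pvLcp cs (cs.drop j) : Int)) ∧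
  ((l = 0 ∧ r = 0 ∧ i = 1) ∨ (1 ≤ l ∧ l < i ∧ r = l + (pvLcp cs (cs.drop l.toNat) : Int)))

lemma pvZ_loop (cs : List Char) : ∀ (K : Nat) (i : Int) (z : List Int) (l r : Int),
    i + K = (cs.length : Int) → 1 ≤ i → pvZinv cs i z l r →
    ∀ j : Nat, 1 ≤ j → (j : Int) < (cs.length : Int) →
      ((PySem.List.pyRange i (cs.length : Int) 1).foldl (pvZstep cs (cs.length : Int)) (z, l, r)).1.getD j 0
        = (pvLcp cs (cs.drop j) : Int) := by
  intro K
  induction K with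
  | zero =>
    intro i z l r hK hi1 hinv j hj1 hjn
    rw [PySem.List.pyRange_one_eq_nil (by omega)]
    exact hinv.2.1 j hj1 (by omega)
  | succ K ih =>
    intro i z l r hK hi1 hinv j hj1 hjn
    obtain ⟨hlen, hz, hlr⟩ := hinv
    have hin : i < (cs.length : Int) := by omega
    rw [PySem.List.pyRange_one_cons hin, List.foldl_cons]
    -- the computed extension equals lcp at i
    have hLi : ∀ k0 : Int, 0 ≤ k0 → k0.toNat ≤ pvLcp cs (cs.drop i.toNat) →
        pvZext cs (cs.length : Int) i (cs.length : Int).toNat k0 = (pvLcp cs (cs.drop i.toNat) : Int) := by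
      intro k0 h0 hk
      exact pvZext_eq cs i hi1 (by omega) _ k0 h0 hk
        (by have := pvLcp_le_left cs (cs.drop i.toNat); omega)
    have hstep : pvZstep cs (cs.length : Int) (z, l, r) i =
        (z.set i.toNat (pvLcp cs (cs.drop i.toNat) : Int),
         if i + (pvLcp cs (cs.drop i.toNat) : Int) > r then (i, i + (pvLcp cs (cs.drop i.toNat) : Int))
         else (l, r)) := by
      simp only [pvZstep]
      by_cases hir : i < r
      · -- memoised start
        rcases hlr with ⟨h0, hr0, _⟩ | ⟨hl1, hli, hr⟩
        · omega
        · have harg : (((i - l).toNat : Nat) : Int) < i := by omega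
          have hjl : z.getD (i - l).toNat 0 = (pvLcp cs (cs.drop (i - l).toNat) : Int) :=
            hz (i - l).toNat (by omega) harg
          have hnn : 0 ≤ min (r - i) (pvLcp cs (cs.drop (i - l).toNat) : Int) :=
            le_min (by omega) (by positivity)
          have hbound : (min (r - i) (pvLcp cs (cs.drop (i - l).toNat) : Int)).toNat ≤
              pvLcp cs (cs.drop i.toNat) := by
            apply pvZ_memo cs l.toNat i.toNat
            case hl1 => omega
            case hli => omega
            case ht1 =>
              have h1 := min_le_left (r - i) (pvLcp cs (cs.drop (i - l).toNat) : Int)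
              omega
            case ht2 =>
              have h2 := min_le_right (r - i) (pvLcp cs (cs.drop (i - l).toNat) : Int)
              have heq : (i - l).toNat = i.toNat - l.toNat := by omega
              rw [← heq]
              omega
          rw [if_pos hir, hjl, hLi _ hnn hbound]
          by_cases hup : i + (pvLcp cs (cs.drop i.toNat) : Int) > r <;> simp [hup]
      · rw [if_neg hir, hLi 0 le_rfl (by simp)]
        by_cases hup : i + (pvLcp cs (cs.drop i.toNat) : Int) > r <;> simp [hup]
    rw [hstep]
    -- new invariant
    have hzlen2 : (z.set i.toNat (pvLcp cs (cs.drop i.toNat) : Int)).length = cs.length := by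
      simp [hlen]
    have hz2 : ∀ j : Nat, 1 ≤ j → (j : Int) < i + 1 →
        (z.set i.toNat (pvLcp cs (cs.drop i.toNat) : Int)).getD j 0 = (pvLcp cs (cs.drop j) : Int) := by
      intro j hj1' hji
      by_cases hji' : (j : Int) < i
      · have hne : i.toNat ≠ j := by omega
        rw [List.getD_eq_getElem?_getD, List.getElem?_set_ne hne, ← List.getD_eq_getElem?_getD]
        exact hz j hj1' hji'
      · have hjeq : j = i.toNat := by omega
        subst hjeq
        rw [List.getD_eq_getElem?_getD, List.getElem?_set_self (by omega)]
        simp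
    by_cases hup : i + (pvLcp cs (cs.drop i.toNat) : Int) > r
    · rw [if_pos hup]
      exact ih (i + 1) _ i (i + (pvLcp cs (cs.drop i.toNat) : Int)) (by omega) (by omega)
        ⟨hzlen2, hz2, Or.inr ⟨by omega, by omega, rfl⟩⟩ j hj1 hjn
    · rw [if_neg hup]
      rcases hlr with ⟨h0, hr0, _⟩ | ⟨hl1, hli, hr⟩
      · exfalso
        have : (0:Int) ≤ (pvLcp cs (cs.drop i.toNat) : Int) := by positivity
        omega
      · exact ih (i + 1) _ l r (by omega) (by omega)
          ⟨hzlen2, hz2, Or.inr ⟨hl1, by omega, hr⟩⟩ j hj1 hjn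

-- the largest i ≤ N whose length-i prefix immediately repeats, as a recursion
def pvLastMatch (cs : List Char) : Nat → Nat
  | 0 => 0
  | N + 1 => if cs.take (N + 1) = (cs.drop (N + 1)).take (N + 1) then N + 1 else pvLastMatch cs N

lemma pvLastMatch_spec (cs : List Char) : ∀ N, pvLastMatch cs N ≠ 0 →
    1 ≤ pvLastMatch cs N ∧ pvLastMatch cs N ≤ N ∧
      cs.take (pvLastMatch cs N) = (cs.drop (pvLastMatch cs N)).take (pvLastMatch cs N) := by
  intro N
  induction N with
  | zero => simp [pvLastMatch]
  | succ N ih =>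
    intro h
    simp only [pvLastMatch] at h ⊢
    split
    · rename_i hc
      exact ⟨by omega, le_rfl, by simpa using hc⟩
    · rename_i hc
      rw [if_neg hc] at h
      obtain ⟨a, b, c⟩ := ih h
      exact ⟨a, by omega, c⟩

lemma pv_foldr_max_comm (b : Nat) (l : List Nat) : l.foldr max b = max b (l.foldr max 0) := by
  induction l with
  | nil => simp
  | cons x l ih => simp only [List.foldr_cons, ih]; omega

lemma pv_foldr_max_le (l : List Nat) (B : Nat) (h : ∀ x ∈ l, x ≤ B) : l.foldr max 0 ≤ B := by
  induction l with
  | nil => simp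
  | cons x l ih =>
    simp only [List.foldr_cons]
    have := h x (by simp)
    have := ih (fun y hy => h y (by simp [hy]))
    omega

lemma pvCut_aux (cs : List Char) : ∀ N,
    ((List.range (N + 1)).filter
      (fun i => decide (0 < i ∧ cs.take i = (cs.drop i).take i))).foldr max 0 = pvLastMatch cs N := by
  intro N
  induction N with
  | zero => simp [pvLastMatch, List.range_succ]
  | succ N ih =>
    rw [List.range_succ, List.filter_append, List.foldr_append]
    by_cases hc : cs.take (N + 1) = (cs.drop (N + 1)).take (N + 1)
    · have : List.filter (fun i => decide (0 < i ∧ cs.take i = (cs.drop i).take i)) [N + 1] = [N + 1] := by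
        simp [hc]
      rw [this]
      simp only [List.foldr_cons, List.foldr_nil]
      rw [pv_foldr_max_comm]
      have hle : ((List.range (N + 1)).filter
          (fun i => decide (0 < i ∧ cs.take i = (cs.drop i).take i))).foldr max 0 ≤ N := by
        apply pv_foldr_max_le
        intro x hx
        have := List.of_mem_filter hx
        have := List.mem_range.1 (List.mem_of_mem_filter hx)
        omega
      simp only [pvLastMatch, if_pos hc]
      omega
    · have : List.filter (fun i => decide (0 < i ∧ cs.take i = (cs.drop i).take i)) [N + 1] = [] := by
        simp [hc]
      rw [this]
      simp only [List.foldr_nil, pvLastMatch, if_neg hc]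
      exact ih
  
lemma pvCut_eq (cs : List Char) : pvCut cs = pvLastMatch cs (cs.length / 2) := pvCut_aux cs _

-- the slice condition in A's search loop, for a positive index, is the take/drop condition
lemma pv_slice_cond (cs : List Char) (M : Nat) :
    (PySem.List.slice cs none (some ((M : Int) + 1)) ==
      PySem.List.slice cs (some ((M : Int) + 1)) (some (2 * ((M : Int) + 1)))) =
      decide (cs.take (M + 1) = (cs.drop (M + 1)).take (M + 1)) := by
  have h1 : ((M : Int) + 1) = ((M + 1 : Nat) : Int) := by push_cast; ring
  have h2 : 2 * ((M : Int) + 1) = (((M + 1) + (M + 1) : Nat) : Int) := by push_cast; ring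
  rw [h2, h1]
  rw [show (((M + 1) + (M + 1) : Nat) : Int) = (((M + 1 : Nat) : Int) + ((M + 1 : Nat) : Int)) from by push_cast; ring]
  rw [PySem.List.slice_to_natCast, PySem.List.slice_natCast_add]
  by_cases h : cs.take (M + 1) = (cs.drop (M + 1)).take (M + 1) <;> simp [h]

-- A's descending first-match search returns the largest match (or the default)
lemma pvA_cut_eq (cs : List Char) : ∀ (M : Nat) (d : Int),
    pvA_cutLoop cs d (PySem.List.pyRange (M : Int) 0 (-1)) =
      if pvLastMatch cs M = 0 then d else (pvLastMatch cs M : Int) := by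
  intro M
  induction M with
  | zero => intro d; rw [PySem.List.pyRange_neg_one_eq_nil (by omega)]; simp [pvA_cutLoop, pvLastMatch]
  | succ M ih =>
    intro d
    rw [PySem.List.pyRange_neg_one_cons (by push_cast; omega)]
    simp only [pvA_cutLoop]
    rw [show ((M + 1 : Nat) : Int) - 1 = (M : Int) from by push_cast; ring]
    rw [show ((M + 1 : Nat) : Int) = ((M : Int) + 1) from by push_cast; ring,
        show (2 : Int) * ((M : Int) + 1) = 2 * ((M : Int) + 1) from rfl]
    rw [pv_slice_cond cs M]
    by_cases hc : cs.take (M + 1) = (cs.drop (M + 1)).take (M + 1)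
    · simp only [hc, decide_true, if_true]
      simp only [pvLastMatch, if_pos hc]
      rw [if_neg (by omega)]
      push_cast; ring
    · simp only [hc, decide_false, if_false]
      simp only [pvLastMatch, if_neg hc]
      exact ih d

-- B's ascending keep-last scan over z returns the same largest match
lemma pvB_cut_eq (cs : List Char) (z : List Int) (h2 : 2 ≤ cs.length)
    (Hz : ∀ i : Nat, 1 ≤ i → i < cs.length → z.getD i 0 = (pvLcp cs (cs.drop i) : Int)) :
    ∀ M : Nat, M ≤ cs.length / 2 →
      (PySem.List.pyRange 1 ((M : Int) + 1) 1).foldl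
          (fun c i => if z.getD i.toNat 0 ≥ i then i else c) 0 = (pvLastMatch cs M : Int) := by
  intro M
  induction M with
  | zero => intro _; rw [PySem.List.pyRange_one_eq_nil (by omega)]; simp [pvLastMatch]
  | succ M ih =>
    intro hM
    rw [show ((M + 1 : Nat) : Int) + 1 = (((M : Int) + 1) + 1) from by push_cast; ring]
    rw [PySem.List.pyRange_one_succ_right (by omega), List.foldl_append]
    simp only [List.foldl_cons, List.foldl_nil]
    rw [ih (by omega)]
    have hidx : ((M : Int) + 1).toNat = M + 1 := by omega
    have hlt : M + 1 < cs.length := by omega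
    rw [hidx, Hz (M + 1) (by omega) hlt]
    -- z[M+1] ≥ M+1 iff the prefix of length M+1 repeats
    have hiff : ((M + 1 : Nat) : Int) ≤ (pvLcp cs (cs.drop (M + 1)) : Int) ↔
        cs.take (M + 1) = (cs.drop (M + 1)).take (M + 1) := by
      rw [Int.ofNat_le]
      rw [pvLcp_ge_iff]
      constructor
      · exact fun h => h.2.2
      · intro h
        exact ⟨by omega, by simp only [List.length_drop]; omega, h⟩
    by_cases hc : cs.take (M + 1) = (cs.drop (M + 1)).take (M + 1)
    · rw [if_pos (by rw [ge_iff_le, show ((M:Int)+1) = ((M+1 : Nat) : Int) from by push_cast; ring]; exact hiff.2 hc)]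
      simp only [pvLastMatch, if_pos hc]
      push_cast; ring
    · rw [if_neg (by rw [ge_iff_le, show ((M:Int)+1) = ((M+1 : Nat) : Int) from by push_cast; ring]; exact fun h => hc (hiff.1 h))]
      simp only [pvLastMatch, if_neg hc]

-- run lengths of consecutive equal pieces
def pvRl : List (List Char) → List Int
  | [] => []
  | [_] => [1]
  | p :: q :: rest =>
    if p == q then
      match pvRl (q :: rest) with
      | h :: t => (h + 1) :: t
      | [] => []
    else 1 :: pvRl (q :: rest)

def pvMerge (cnt : Int) : List Int → List Int
  | [] => []
  | h :: t => (cnt + h - 1) :: t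

-- compressed length of a run list as B computes it
def pvSB (cut : Int) : List Int → Int
  | [] => 0
  | k :: r => cut + (if k > 1 then pvBdl k else 0) + pvSB cut r

-- compressed length as A's loop writes it (p = run length before the current suffix)
def pvG (cut : Int) : Int → List Int → Int
  | _, [] => 0
  | p, [k] => if k > 1 then pvBdl k + cut else if p > 1 then 1 + cut else 0
  | _, k :: k' :: r => cut + (if k > 1 then pvBdl k else 0) + pvG cut k (k' :: r)

def pvPc (cs : List Char) (cut : Int) (i : Int) : List Char :=
  PySem.List.slice cs (some (i * cut)) (some (i * cut + cut))

def pvPi (cs : List Char) (cut circle j₀ : Int) : List (List Char) :=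
  (PySem.List.pyRange (j₀ - 1) (circle + 1) 1).map (pvPc cs cut)

lemma pvRl_ne_nil (p : List Char) (rest : List (List Char)) : pvRl (p :: rest) ≠ [] := by
  induction rest generalizing p with
  | nil => simp [pvRl]
  | cons q rest ih =>
    simp only [pvRl]
    split
    · rcases h : pvRl (q :: rest) with _ | ⟨h0, t0⟩
      · exact absurd h (ih q)
      · simp
    · simp

lemma pvMerge_one : ∀ R : List Int, pvMerge 1 R = R := by
  intro R
  cases R with
  | nil => rfl
  | cons h t => simp only [pvMerge]; rw [show (1 : Int) + h - 1 = h from by ring]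

-- B's run-length loop, from block j₀ on, adds the compressed length of the remaining runs
lemma pvB_main (cs : List Char) (cut m : Int) :
    ∀ (K : Nat) (j₀ : Int), j₀ + K = m → 1 ≤ j₀ →
    ∀ (total run : Int), 1 ≤ run →
      (((PySem.List.pyRange j₀ m 1).foldl (pvBrle cs cut) (total, run)).1 + cut +
        (if ((PySem.List.pyRange j₀ m 1).foldl (pvBrle cs cut) (total, run)).2 > 1 then
          pvBdl ((PySem.List.pyRange j₀ m 1).foldl (pvBrle cs cut) (total, run)).2 else 0))
      = total + pvSB cut (pvMerge run (pvRl (pvPi cs cut (m - 1) j₀))) := by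
  intro K
  induction K with
  | zero =>
    intro j₀ hK hj1 total run hrun
    have hj0 : j₀ = m := by omega
    subst hj0
    rw [PySem.List.pyRange_one_eq_nil (by omega)]
    simp only [List.foldl_nil]
    have hPi : pvPi cs cut (j₀ - 1) j₀ = [pvPc cs cut (j₀ - 1)] := by
      unfold pvPi
      rw [PySem.List.pyRange_one_cons (by omega), PySem.List.pyRange_one_eq_nil (by omega)]
      simp
    rw [hPi]
    simp only [pvRl, pvMerge, pvSB]
    rw [show run + 1 - 1 = run from by ring]
    ring
  | succ K ih =>
    intro j₀ hK hj1 total run hrun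
    have hjm : j₀ < m := by omega
    rw [PySem.List.pyRange_one_cons (by omega)]
    simp only [List.foldl_cons]
    have hPic : pvPi cs cut (m - 1) j₀ = pvPc cs cut (j₀ - 1) :: pvPi cs cut (m - 1) (j₀ + 1) := by
      unfold pvPi
      rw [PySem.List.pyRange_one_cons (by omega)]
      simp only [List.map_cons]
      rw [show j₀ - 1 + 1 = j₀ + 1 - 1 from by ring]
    rcases hq : pvRl (pvPi cs cut (m - 1) (j₀ + 1)) with _ | ⟨h0, t0⟩
    · exfalso
      have : pvPi cs cut (m - 1) (j₀ + 1) ≠ [] := by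
        unfold pvPi
        rw [PySem.List.pyRange_one_cons (by omega)]
        simp
      rcases hL : pvPi cs cut (m - 1) (j₀ + 1) with _ | ⟨x, xs⟩
      · exact this hL
      · rw [hL] at hq; exact pvRl_ne_nil x xs hq
    have hPic2 : pvPi cs cut (m - 1) (j₀ + 1) = pvPc cs cut j₀ :: pvPi cs cut (m - 1) (j₀ + 2) := by
      unfold pvPi
      rw [PySem.List.pyRange_one_cons (by omega)]
      simp only [List.map_cons]
      rw [show j₀ + 1 - 1 = j₀ from by ring, show j₀ + 2 - 1 = j₀ + 1 from by ring]
    -- the loop's comparison is piece j₀ vs piece j₀-1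
    have hcond : (PySem.List.slice cs (some (j₀ * cut)) (some ((j₀ + 1) * cut)) =
        PySem.List.slice cs (some ((j₀ - 1) * cut)) (some (j₀ * cut))) ↔
        (pvPc cs cut j₀ = pvPc cs cut (j₀ - 1)) := by
      unfold pvPc
      rw [show (j₀ + 1) * cut = j₀ * cut + cut from by ring,
          show (j₀ - 1) * cut + cut = j₀ * cut from by ring]
    have hq2 : pvRl (pvPc cs cut j₀ :: pvPi cs cut (m - 1) (j₀ + 2)) = h0 :: t0 := by
      rw [← hPic2]; exact hq
    by_cases hm : pvPc cs cut (j₀ - 1) = pvPc cs cut j₀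
    · rw [pvBrle, if_pos (hcond.2 hm.symm)]
      rw [ih (j₀ + 1) (by omega) (by omega) total (run + 1) (by omega)]
      have hrl : pvRl (pvPi cs cut (m - 1) j₀) = (h0 + 1) :: t0 := by
        rw [hPic, hPic2]
        simp only [pvRl]
        rw [if_pos (by rw [beq_iff_eq]; exact hm), hq2]
      rw [hrl, hq]
      simp only [pvMerge]
      rw [show run + 1 + h0 - 1 = run + (h0 + 1) - 1 from by ring]
    · rw [pvBrle, if_neg (fun h => hm (hcond.1 h).symm)]
      rw [ih (j₀ + 1) (by omega) (by omega) _ 1 le_rfl]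
      have hrl : pvRl (pvPi cs cut (m - 1) j₀) = 1 :: (h0 :: t0) := by
        rw [hPic, hPic2]
        simp only [pvRl]
        rw [if_neg (by rw [beq_iff_eq]; exact hm), hq2]
      rw [hrl, hq, pvMerge_one]
      simp only [pvMerge]
      rw [show run + 1 - 1 = run from by ring]
      simp only [pvSB]
      ring

-- last element of a run list
def pvLast : List Int → Int
  | [] => 0
  | [k] => k
  | _ :: k :: r => pvLast (k :: r)

lemma pvLast_cons (x y : Int) (t : List Int) : pvLast (x :: y :: t) = pvLast (y :: t) := rfl

lemma pvLast_append_singleton (R : List Int) (x : Int) : pvLast (R ++ [x]) = x := by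
  induction R with
  | nil => rfl
  | cons h t ih =>
    cases t with
    | nil => rfl
    | cons y s => simpa using ih

-- when the final run has length > 1, A's flush and B's count agree
lemma pvG_eq_pvSB (cut : Int) : ∀ (t : List Int) (h p : Int), 1 < pvLast (h :: t) →
    pvG cut p (h :: t) = pvSB cut (h :: t) := by
  intro t
  induction t with
  | nil =>
    intro h p hl
    simp only [pvLast] at hl
    simp only [pvG, pvSB, if_pos hl]
    ring
  | cons k r ih =>
    intro h p hl
    rw [pvLast_cons] at hl
    simp only [pvG, pvSB]
    rw [ih k h hl]
    simp only [pvSB]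

-- when the final run has length 1, A's value is B's minus cut or plus 1
lemma pvG_last_one (cut : Int) : ∀ (t : List Int) (h p : Int), pvLast (h :: t) = 1 →
    pvG cut p (h :: t) = pvSB cut (h :: t) - cut ∨ pvG cut p (h :: t) = pvSB cut (h :: t) + 1 := by
  intro t
  induction t with
  | nil =>
    intro h p hl
    simp only [pvLast] at hl
    subst hl
    simp only [pvG, pvSB]
    rw [if_neg (by omega)]
    by_cases hp : p > 1
    · right; rw [if_pos hp, if_neg (show ¬((1:Int) > 1) from by omega)]; ring
    · left; rw [if_neg hp, if_neg (show ¬((1:Int) > 1) from by omega)]; ring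
  | cons k r ih =>
    intro h p hl
    rw [pvLast_cons] at hl
    simp only [pvG, pvSB]
    rcases ih k h hl with he | he
    · left; rw [he]; simp only [pvSB]; ring
    · right; rw [he]; simp only [pvSB]; ring

-- a stray final block after a closed run of length 1 costs nothing extra
lemma pvG_append_one_last_one (cut : Int) : ∀ (t : List Int) (h p : Int), pvLast (h :: t) = 1 →
    pvG cut p ((h :: t) ++ [1]) = pvSB cut (h :: t) := by
  intro t
  induction t with
  | nil =>
    intro h p hl
    simp only [pvLast] at hl
    subst hl
    simp only [List.cons_append, List.nil_append, pvG, pvSB]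
    rw [if_neg (show ¬((1:Int) > 1) from by omega), if_neg (show ¬((1:Int) > 1) from by omega),
        if_neg (show ¬((1:Int) > 1) from by omega)]
  | cons k r ih =>
    intro h p hl
    rw [pvLast_cons] at hl
    simp only [List.cons_append, pvG]
    have := ih k h hl
    simp only [List.cons_append] at this
    rw [this]
    simp only [pvSB]

-- a stray final block after a closed run of length > 1 costs A an extra "1"+word
lemma pvG_append_one_last_gt (cut : Int) : ∀ (t : List Int) (h p : Int), 1 < pvLast (h :: t) →
    pvG cut p ((h :: t) ++ [1]) = pvSB cut (h :: t) + 1 + cut := by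
  intro t
  induction t with
  | nil =>
    intro h p hl
    simp only [pvLast] at hl
    simp only [List.cons_append, List.nil_append, pvG, pvSB]
    rw [if_pos hl, if_neg (show ¬((1:Int) > 1) from by omega), if_pos hl]
    ring
  | cons k r ih =>
    intro h p hl
    rw [pvLast_cons] at hl
    simp only [List.cons_append, pvG]
    have := ih k h hl
    simp only [List.cons_append] at this
    rw [this]
    simp only [pvSB]
    ring

-- last piece of a nonempty piece list
def pvLastL : List (List Char) → List Char
  | [] => []
  | [q] => q
  | _ :: q :: rest => pvLastL (q :: rest)

lemma pvLastL_cons (x y : List Char) (t : List (List Char)) :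
    pvLastL (x :: y :: t) = pvLastL (y :: t) := rfl

lemma pvLastL_append_singleton (ps : List (List Char)) (q : List Char) :
    pvLastL (ps ++ [q]) = q := by
  induction ps with
  | nil => rfl
  | cons h t ih =>
    cases t with
    | nil => rfl
    | cons y s => simpa using ih

-- appending a piece different from the last one appends a fresh run of length 1
lemma pvRl_append_ne : ∀ (t : List (List Char)) (p q : List Char), pvLastL (p :: t) ≠ q →
    pvRl ((p :: t) ++ [q]) = pvRl (p :: t) ++ [1] := by
  intro t
  induction t with
  | nil =>
    intro p q hne
    simp only [pvLastL] at hne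
    simp only [List.cons_append, List.nil_append, pvRl]
    rw [if_neg (by rw [beq_iff_eq]; exact hne)]
  | cons y s ih =>
    intro p q hne
    rw [pvLastL_cons] at hne
    have hih := ih y q hne
    rcases hrl : pvRl (y :: s) with _ | ⟨h0, t0⟩
    · exact absurd hrl (pvRl_ne_nil y s)
    simp only [List.cons_append] at hih ⊢
    simp only [pvRl]
    rw [hih, hrl]
    by_cases hpy : p = y
    · rw [if_pos (by rw [beq_iff_eq]; exact hpy), if_pos (by rw [beq_iff_eq]; exact hpy)]
      simp
    · rw [if_neg (by rw [beq_iff_eq]; exact hpy), if_neg (by rw [beq_iff_eq]; exact hpy)]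
      simp

-- two equal final pieces make the final run length at least 2
lemma pvRl_last_two_eq : ∀ (ps : List (List Char)) (a : List Char),
    1 < pvLast (pvRl (ps ++ [a, a])) := by
  intro ps
  induction ps with
  | nil =>
    intro a
    norm_num [pvRl, pvLast]
  | cons p ps ih =>
    intro a
    rcases hL : ps ++ [a, a] with _ | ⟨x, xs⟩
    · exact absurd hL (by simp)
    have hih := ih a
    rw [hL] at hih
    simp only [List.cons_append, hL]
    rcases hrl : pvRl (x :: xs) with _ | ⟨h0, t0⟩
    · exact absurd hrl (pvRl_ne_nil x xs)
    simp only [List.cons_append, pvRl]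
    rw [hrl] at hih
    by_cases hpx : p = x
    · rw [if_pos (by rw [beq_iff_eq]; exact hpx), hrl]
      cases t0 with
      | nil => simp only [pvLast] at hih ⊢; omega
      | cons u v => rwa [pvLast_cons]
    · rw [if_neg (by rw [beq_iff_eq]; exact hpx), hrl, pvLast_cons]
      exact hih

-- two different final pieces make the final run length exactly 1
lemma pvRl_last_two_ne (ps : List (List Char)) (a b : List Char) (hne : a ≠ b) :
    pvLast (pvRl (ps ++ [a, b])) = 1 := by
  have h1 : ps ++ [a, b] = (ps ++ [a]) ++ [b] := by simp
  have h2 : pvLastL (ps ++ [a]) = a := pvLastL_append_singleton ps a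
  rcases hL : ps ++ [a] with _ | ⟨x, xs⟩
  · exact absurd hL (by simp)
  rw [h1, hL]
  rw [pvRl_append_ne xs x b (by rw [← hL, h2]; exact hne)]
  exact pvLast_append_singleton _ _
-- length of a full piece
lemma pv_len_pc (cs : List Char) (cut i : Int) (hcut : 0 < cut) (hi : 0 ≤ i)
    (hub : (i + 1) * cut ≤ (cs.length : Int)) : ((pvPc cs cut i).length : Int) = cut := by
  unfold pvPc
  have h1 : 0 ≤ i * cut := mul_nonneg hi (le_of_lt hcut)
  rw [PySem.List.slice_toNat cs h1 (by omega)]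
  rw [show (i + 1) * cut = i * cut + cut from by ring] at hub
  simp only [List.length_take, List.length_drop]
  omega

-- A's loop from j₀ to circle: final answerl length
lemma pv_mainA (cs : List Char) (cut circle : Int) (hcut : 0 < cut)
    (hcl : circle * cut ≤ (cs.length : Int)) :
    ∀ (k : Nat) (j₀ : Int), j₀ + k = circle → 1 ≤ j₀ →
    ∀ (cnt : Int) (ans word : List Char) (p₀ : Int), 1 ≤ cnt →
      (1 < cnt → (word.length : Int) = cut) →
      ((((PySem.List.pyRange j₀ (circle + 1) 1).foldl (pvA_step cs cut circle) (cnt, ans, word)).2.1.length : Int))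
        = (ans.length : Int) + pvG cut p₀ (pvMerge cnt (pvRl (pvPi cs cut circle j₀))) := by
  intro k
  induction k with
  | zero =>
    intro j₀ hj hj1 cnt ans word p₀ hcnt hword
    have hj0 : j₀ = circle := by omega
    subst hj0
    rw [PySem.List.pyRange_one_singleton]
    simp only [List.foldl_cons, List.foldl_nil]
    have hPi : pvPi cs cut j₀ j₀ =
        [PySem.List.slice cs (some (j₀ * cut - cut)) (some (j₀ * cut)),
         PySem.List.slice cs (some (j₀ * cut)) (some (j₀ * cut + cut))] := by
      unfold pvPi
      rw [PySem.List.pyRange_one_cons (by omega), PySem.List.pyRange_one_cons (by omega),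
          PySem.List.pyRange_one_eq_nil (by omega)]
      simp only [List.map_cons, List.map_nil]
      unfold pvPc
      rw [show (j₀ - 1) * cut = j₀ * cut - cut from by ring,
          show j₀ * cut - cut + cut = j₀ * cut from by ring,
          show j₀ - 1 + 1 = j₀ from by ring]
    rw [hPi]
    have hXlen : ((PySem.List.slice cs (some (j₀ * cut - cut)) (some (j₀ * cut))).length : Int) = cut := by
      have := pv_len_pc cs cut (j₀ - 1) hcut (by omega)
        (by rw [show (j₀ - 1 + 1) * cut = j₀ * cut from by ring]; exact hcl)
      unfold pvPc at this
      rw [show (j₀ - 1) * cut = j₀ * cut - cut from by ring,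
          show j₀ * cut - cut + cut = j₀ * cut from by ring] at this
      exact this
    simp only [pvA_step, beq_self_eq_true, if_true]
    by_cases hm : PySem.List.slice cs (some (j₀ * cut - cut)) (some (j₀ * cut)) =
        PySem.List.slice cs (some (j₀ * cut)) (some (j₀ * cut + cut))
    · rw [if_pos (by rw [beq_iff_eq]; exact hm)]
      have hrl : pvRl [PySem.List.slice cs (some (j₀ * cut - cut)) (some (j₀ * cut)),
          PySem.List.slice cs (some (j₀ * cut)) (some (j₀ * cut + cut))] = [2] := by
        simp only [pvRl]
        rw [if_pos (by rw [beq_iff_eq]; exact hm)]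
        norm_num
      rw [hrl]
      simp only [pvMerge]
      rw [show cnt + 2 - 1 = cnt + 1 from by ring]
      simp only [pvG, if_pos (by omega : cnt + 1 > 1)]
      simp only [List.length_append, pvBdl]
      push_cast
      omega
    · rw [if_neg (by rw [beq_iff_eq]; exact hm)]
      have hrl : pvRl [PySem.List.slice cs (some (j₀ * cut - cut)) (some (j₀ * cut)),
          PySem.List.slice cs (some (j₀ * cut)) (some (j₀ * cut + cut))] = [1, 1] := by
        simp only [pvRl]
        rw [if_neg (by rw [beq_iff_eq]; exact hm)]
      rw [hrl]
      by_cases hc1 : cnt = 1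
      · subst hc1
        rw [if_pos (by simp)]
        simp only [pvMerge]
        rw [show (1:Int) + 1 - 1 = 1 from by ring]
        simp only [pvG]
        rw [if_neg (by omega : ¬ ((1:Int) > 1)), if_neg (by omega : ¬ ((1:Int) > 1))]
        simp only [List.length_append]
        push_cast
        omega
      · rw [if_neg (by simp [hc1])]
        have hcnt2 : 1 < cnt := by omega
        have hwlen : (word.length : Int) = cut := hword hcnt2
        simp only [pvMerge]
        rw [show cnt + 1 - 1 = cnt from by ring]
        simp only [pvG]
        rw [if_pos (by omega : cnt > 1), if_neg (by omega : ¬ ((1:Int) > 1)),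
            if_pos (by omega : cnt > 1)]
        simp only [List.length_append, pvBdl]
        have h1 : (PySem.Int.toChars 1).length = 1 := by decide
        push_cast [h1]
        omega
  | succ k ih =>
    intro j₀ hj hj1 cnt ans word p₀ hcnt hword
    have hlt : j₀ < circle := by omega
    rw [PySem.List.pyRange_one_cons (by omega)]
    simp only [List.foldl_cons]
    have hPic : pvPi cs cut circle j₀ =
        PySem.List.slice cs (some (j₀ * cut - cut)) (some (j₀ * cut)) :: pvPi cs cut circle (j₀ + 1) := by
      unfold pvPi
      rw [PySem.List.pyRange_one_cons (by omega)]
      simp only [List.map_cons]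
      unfold pvPc
      rw [show (j₀ - 1) * cut = j₀ * cut - cut from by ring,
          show j₀ * cut - cut + cut = j₀ * cut from by ring,
          show j₀ - 1 + 1 = j₀ + 1 - 1 from by ring]
    have hPic2 : pvPi cs cut circle (j₀ + 1) =
        PySem.List.slice cs (some (j₀ * cut)) (some (j₀ * cut + cut)) :: pvPi cs cut circle (j₀ + 2) := by
      unfold pvPi
      rw [PySem.List.pyRange_one_cons (by omega)]
      simp only [List.map_cons]
      unfold pvPc
      rw [show (j₀ + 1 - 1) * cut = j₀ * cut from by ring,
          show j₀ + 1 - 1 + 1 = j₀ + 2 - 1 from by ring]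
    rcases hq : pvRl (pvPi cs cut circle (j₀ + 1)) with _ | ⟨h0, t0⟩
    · rw [hPic2] at hq; exact absurd hq (pvRl_ne_nil _ _)
    have hq2 : pvRl (PySem.List.slice cs (some (j₀ * cut)) (some (j₀ * cut + cut)) :: pvPi cs cut circle (j₀ + 2))
        = h0 :: t0 := by rw [← hPic2]; exact hq
    have hXlen : ((PySem.List.slice cs (some (j₀ * cut - cut)) (some (j₀ * cut))).length : Int) = cut := by
      have := pv_len_pc cs cut (j₀ - 1) hcut (by omega)
        (by rw [show (j₀ - 1 + 1) * cut = j₀ * cut from by ring]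
            calc j₀ * cut ≤ circle * cut := by
                  apply mul_le_mul_of_nonneg_right (by omega) (by omega)
              _ ≤ _ := hcl)
      unfold pvPc at this
      rw [show (j₀ - 1) * cut = j₀ * cut - cut from by ring,
          show j₀ * cut - cut + cut = j₀ * cut from by ring] at this
      exact this
    have hne : (j₀ == circle) = false := by simp; omega
    simp only [pvA_step, hne, Bool.false_eq_true, if_false]
    by_cases hm : PySem.List.slice cs (some (j₀ * cut - cut)) (some (j₀ * cut)) =
        PySem.List.slice cs (some (j₀ * cut)) (some (j₀ * cut + cut))
    · rw [if_pos (by rw [beq_iff_eq]; exact hm)]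
      rw [ih (j₀ + 1) (by omega) (by omega) (cnt + 1) ans _ p₀ (by omega) (fun _ => hXlen)]
      have hrl : pvRl (pvPi cs cut circle j₀) = (h0 + 1) :: t0 := by
        rw [hPic, hPic2]
        simp only [pvRl]
        rw [if_pos (by rw [beq_iff_eq]; exact hm), hq2]
      rw [hrl, hq]
      simp only [pvMerge]
      rw [show cnt + 1 + h0 - 1 = cnt + (h0 + 1) - 1 from by ring]
    · rw [if_neg (by rw [beq_iff_eq]; exact hm)]
      have hrl : pvRl (pvPi cs cut circle j₀) = 1 :: h0 :: t0 := by
        rw [hPic, hPic2]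
        simp only [pvRl]
        rw [if_neg (by rw [beq_iff_eq]; exact hm), hq2]
      by_cases hc1 : cnt = 1
      · subst hc1
        rw [if_pos (by simp)]
        rw [ih (j₀ + 1) (by omega) (by omega) 1 _ word 1 (by omega)
            (fun h => absurd h (by omega))]
        rw [hrl, hq]
        simp only [pvMerge]
        rw [show (1:Int) + h0 - 1 = h0 from by ring, show (1:Int) + 1 - 1 = 1 from by ring]
        simp only [pvG]
        rw [if_neg (by omega : ¬ ((1:Int) > 1))]
        simp only [List.length_append]
        push_cast
        omega
      · rw [if_neg (by simp [hc1])]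
        have hcnt2 : 1 < cnt := by omega
        have hwlen : (word.length : Int) = cut := hword hcnt2
        rw [ih (j₀ + 1) (by omega) (by omega) 1 _ word cnt (by omega)
            (fun h => absurd h (by omega))]
        rw [hrl, hq]
        simp only [pvMerge]
        rw [show (1:Int) + h0 - 1 = h0 from by ring, show cnt + 1 - 1 = cnt from by ring]
        simp only [pvG]
        rw [if_pos (by omega : cnt > 1)]
        simp only [List.length_append, pvBdl]
        push_cast
        omega

-- pieces as slices vs pieces as drop/take
lemma pvPc_nat (cs : List Char) (c j : Nat) :
    pvPc cs ((c : Nat) : Int) ((j : Nat) : Int) = pvPieceN cs c j := by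
  unfold pvPc pvPieceN
  rw [show ((j : Nat) : Int) * ((c : Nat) : Int) = ((j * c : Nat) : Int) from by push_cast; ring]
  exact PySem.List.slice_natCast_add cs (j * c) c

-- the whole piece list split at the final two full pieces
lemma pv_splitA (cs : List Char) (cut m : Int) (hm : 2 ≤ m) :
    pvPi cs cut (m - 1) 1 =
      ((PySem.List.pyRange 0 (m - 2) 1).map (pvPc cs cut)) ++
        [pvPc cs cut (m - 2), pvPc cs cut (m - 1)] := by
  unfold pvPi
  rw [show (1 : Int) - 1 = 0 from by ring, show m - 1 + 1 = m from by ring]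
  rw [PySem.List.pyRange_one_append 0 (m - 2) m (by omega) (by omega)]
  rw [PySem.List.pyRange_one_cons (show m - 2 < m from by omega)]
  rw [show m - 2 + 1 = m - 1 from by ring]
  rw [PySem.List.pyRange_one_cons (show m - 1 < m from by omega)]
  rw [PySem.List.pyRange_one_eq_nil (show m ≤ m - 1 + 1 from by omega)]
  simp

-- the piece list including the tail block
lemma pv_splitT (cs : List Char) (cut m : Int) (hm : 2 ≤ m) :
    pvPi cs cut m 1 = pvPi cs cut (m - 1) 1 ++ [pvPc cs cut m] := by
  unfold pvPi
  rw [show (1 : Int) - 1 = 0 from by ring, show m - 1 + 1 = m from by ring]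
  rw [PySem.List.pyRange_one_succ_right (by omega)]
  simp

lemma pv_master (s : String) (hp : 2 ≤ s.toList.length) :
    (¬ D_solution s → solution s = solution_alt s) ∧
    (D_solution s → solution s ≠ solution_alt s) := by
  set cs := s.toList with hcs
  set nN := cs.length with hnN
  set L := pvLastMatch cs (nN / 2) with hLdef
  have hlen : PySem.Str.len s = (nN : Int) := by
    rw [PySem.Str.len_eq, ← hcs]
  have hmx : PySem.Int.floordiv (nN : Int) 2 = ((nN / 2 : Nat) : Int) := by
    exact_mod_cast PySem.Int.floordiv_natCast nN 2
  -- D in terms of L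
  have hDiff : D_solution s ↔ (L ≠ 0 ∧
      ((nN % L = 0 ∧ pvPieceN cs L (nN / L - 2) ≠ pvPieceN cs L (nN / L - 1)) ∨
       (nN % L ≠ 0 ∧ pvPieceN cs L (nN / L - 2) = pvPieceN cs L (nN / L - 1)))) := by
    have h0 : D_solution s ↔ (pvCut cs ≠ 0 ∧
        ((nN % pvCut cs = 0 ∧
            pvPieceN cs (pvCut cs) (nN / pvCut cs - 2) ≠ pvPieceN cs (pvCut cs) (nN / pvCut cs - 1)) ∨
         (nN % pvCut cs ≠ 0 ∧
            pvPieceN cs (pvCut cs) (nN / pvCut cs - 2) = pvPieceN cs (pvCut cs) (nN / pvCut cs - 1)))) :=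
      Iff.rfl
    rw [h0, pvCut_eq, ← hnN, ← hLdef]
  -- the value of A's search loop
  have hAcut : pvA_cutLoop cs (nN : Int) (PySem.List.pyRange (PySem.Int.floordiv (nN : Int) 2) 0 (-1)) =
      if L = 0 then (nN : Int) else (L : Int) := by
    rw [hmx]; exact pvA_cut_eq cs (nN / 2) (nN : Int)
  -- the z-array computed by B
  have hz : ∀ j : Nat, 1 ≤ j → j < nN →
      (((PySem.List.pyRange 1 ((nN : Int)) 1).foldl (pvZstep cs (nN : Int))
        (List.replicate (nN : Int).toNat 0, 0, 0)).1).getD j 0 = (pvLcp cs (cs.drop j) : Int) := by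
    intro j hj1 hj2
    have htn : ((nN : Int)).toNat = nN := by omega
    rw [htn]
    exact pvZ_loop cs (nN - 1) 1 _ 0 0 (by omega) (by omega)
      ⟨by simp [hnN], fun j hj1' hj2' => absurd hj2' (by omega), Or.inl ⟨rfl, rfl, rfl⟩⟩
      j hj1 (by omega)
  -- the value of B's keep-last scan
  have hBcut : (PySem.List.pyRange 1 (PySem.Int.floordiv (nN : Int) 2 + 1) 1).foldl
      (fun c i => if (((PySem.List.pyRange 1 ((nN : Int)) 1).foldl (pvZstep cs (nN : Int))
        (List.replicate (nN : Int).toNat 0, 0, 0)).1).getD i.toNat 0 ≥ i then i else c) 0 = (L : Int) := by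
    rw [hmx]
    exact pvB_cut_eq cs _ hp (fun i h1 h2 => hz i h1 h2) (nN / 2) le_rfl
  by_cases hL0 : L = 0
  · -- no repeating prefix: both return the length, and D cannot hold
    have hA : solution s = (nN : Int) := by
      unfold solution
      simp only []
      rw [← hcs, hlen, hAcut, if_pos hL0]
      simp
    have hB : solution_alt s = (nN : Int) := by
      unfold solution_alt
      simp only []
      rw [← hcs, hlen, hBcut, hL0]
      simp
    refine ⟨fun _ => by rw [hA, hB], fun hD => absurd hD ?_⟩
    rw [hDiff]
    intro h
    exact h.1 hL0
  · -- a repeating prefix of size L exists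
    obtain ⟨hL1, hLle, hLcond⟩ := pvLastMatch_spec cs (nN / 2) hL0
    rw [← hLdef] at hL1 hLle hLcond
    have h2L : 2 * L ≤ nN := by omega
    set cut : Int := (L : Int) with hcutdef
    have hc0 : 0 < cut := by omega
    set mN := nN / L with hmN
    set remN := nN % L with hremN
    have hmrem : mN * L + remN = nN := Nat.div_add_mod' nN L
    have hremlt : remN < L := Nat.mod_lt _ (by omega)
    have hm2 : 2 ≤ mN := by
      have : 2 * L ≤ mN * L + remN := by omega
      nlinarith
    have hmInt : PySem.Int.floordiv (nN : Int) cut = ((mN : Nat) : Int) := by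
      rw [hcutdef]; exact_mod_cast PySem.Int.floordiv_natCast nN L
    have hremInt : PySem.Int.mod (nN : Int) cut = ((remN : Nat) : Int) := by
      rw [hcutdef]; exact_mod_cast PySem.Int.mod_natCast nN L
    set m : Int := ((mN : Nat) : Int) with hmdef
    have hm2' : 2 ≤ m := by omega
    have hmcut : m * cut ≤ (nN : Int) := by
      rw [hcutdef, hmdef]; push_cast; omega
    have hmcut2 : (nN : Int) < m * cut + cut := by
      rw [hcutdef, hmdef]; push_cast; omega
    -- B's value
    have hBval : solution_alt s = ((remN : Nat) : Int) +
        pvSB cut (pvRl (pvPi cs cut (m - 1) 1)) := by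
      unfold solution_alt
      simp only []
      rw [← hcs, hlen, hBcut]
      rw [if_neg (by simp; omega)]
      rw [hmInt, hremInt]
      have := pvB_main cs cut m (m - 1).toNat 1 (by omega) (by omega) ((remN : Nat) : Int) 1 le_rfl
      rw [this, pvMerge_one]
    -- the piece list split at the last two full blocks
    have hsplitA := pv_splitA cs cut m hm2'
    have hPcm2 : pvPc cs cut (m - 2) = pvPieceN cs L (mN - 2) := by
      rw [hcutdef, show m - 2 = ((mN - 2 : Nat) : Int) from by omega]
      exact pvPc_nat cs L (mN - 2)
    have hPcm1 : pvPc cs cut (m - 1) = pvPieceN cs L (mN - 1) := by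
      rw [hcutdef, show m - 1 = ((mN - 1 : Nat) : Int) from by omega]
      exact pvPc_nat cs L (mN - 1)
    -- the run list of the full blocks is nonempty
    rcases hPiL : pvPi cs cut (m - 1) 1 with _ | ⟨P0, Ps⟩
    · exfalso; rw [hsplitA] at hPiL; simp at hPiL
    rcases hRL : pvRl (P0 :: Ps) with _ | ⟨r0, rs⟩
    · exact absurd hRL (pvRl_ne_nil P0 Ps)
    by_cases hrem : remN = 0
    · -- the block size divides the length
      have hAval : solution s = pvG cut 0 (pvRl (pvPi cs cut (m - 1) 1)) := by
        unfold solution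
        simp only []
        rw [← hcs, hlen, hAcut, if_neg hL0]
        rw [if_neg (by simp; omega)]
        rw [hremInt, hmInt]
        rw [if_neg (show ¬(((remN : Nat) : Int) ≠ 0) from by simp [hrem])]
        rw [if_pos (show (((remN : Nat) : Int) == 0) = true from by simp [hrem])]
        have hcl : (m - 1) * cut ≤ ((cs.length : Nat) : Int) := by
          rw [← hnN]; nlinarith
        have := pv_mainA cs cut (m - 1) hc0 hcl (m - 2).toNat 1 (by omega) (by omega)
          1 [] [] 0 le_rfl (fun h => absurd h (by omega))
        rw [this, pvMerge_one]
        simp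
      by_cases hpe : pvPieceN cs L (mN - 2) = pvPieceN cs L (mN - 1)
      · -- last two blocks equal: A and B agree, D does not hold
        have hlast : 1 < pvLast (pvRl (pvPi cs cut (m - 1) 1)) := by
          rw [hsplitA, hPcm2, hPcm1, hpe]
          exact pvRl_last_two_eq _ _
        rw [hPiL, hRL] at hlast
        have hG : pvG cut 0 (pvRl (pvPi cs cut (m - 1) 1)) =
            pvSB cut (pvRl (pvPi cs cut (m - 1) 1)) := by
          rw [hPiL, hRL]
          exact pvG_eq_pvSB cut rs r0 0 hlast
        constructor
        · intro _
          rw [hAval, hBval, hG, hrem]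
          simp
        · intro hD
          exfalso
          rw [hDiff] at hD
          rcases hD.2 with ⟨_, hne⟩ | ⟨hne, _⟩
          · exact hne hpe
          · exact hne hrem
      · -- last two blocks differ: D holds and A is off by -cut or +1
        have hD : D_solution s := by
          rw [hDiff]
          exact ⟨hL0, Or.inl ⟨hrem, hpe⟩⟩
        have hlast : pvLast (pvRl (pvPi cs cut (m - 1) 1)) = 1 := by
          rw [hsplitA, hPcm2, hPcm1]
          exact pvRl_last_two_ne _ _ _ hpe
        rw [hPiL, hRL] at hlast
        have hG := pvG_last_one cut rs r0 0 hlast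
        refine ⟨fun hnD => absurd hD hnD, fun _ => ?_⟩
        rw [hAval, hBval, hPiL, hRL, hrem]
        rcases hG with he | he <;> rw [he] <;> simp <;> omega
    · -- the block size does not divide the length: the tail block is a fresh run
      have hsplitT := pv_splitT cs cut m hm2'
      have hTlen : ((pvPc cs cut m).length : Int) = ((remN : Nat) : Int) := by
        unfold pvPc
        rw [PySem.List.slice_toNat cs (by positivity) (by positivity)]
        simp only [List.length_take, List.length_drop]
        have h1 : (m * cut).toNat = mN * L := by
          rw [hcutdef, hmdef]; push_cast; omega
        have h2 : (m * cut + cut).toNat = mN * L + L := by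
          rw [hcutdef, hmdef]; push_cast; omega
        rw [h1, h2, ← hnN]
        omega
      have hPlen : ((pvPc cs cut (m - 1)).length : Int) = cut := by
        apply pv_len_pc cs cut (m - 1) hc0 (by omega)
        rw [show (m - 1 + 1) * cut = m * cut from by ring, ← hnN]
        exact hmcut
      have hTne : pvLastL (pvPi cs cut (m - 1) 1) ≠ pvPc cs cut m := by
        have hlastL : pvLastL (pvPi cs cut (m - 1) 1) = pvPc cs cut (m - 1) := by
          rw [hsplitA,
              show ((PySem.List.pyRange 0 (m - 2) 1).map (pvPc cs cut)) ++
                  [pvPc cs cut (m - 2), pvPc cs cut (m - 1)] =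
                (((PySem.List.pyRange 0 (m - 2) 1).map (pvPc cs cut)) ++ [pvPc cs cut (m - 2)]) ++
                  [pvPc cs cut (m - 1)] from by simp]
          exact pvLastL_append_singleton _ _
        rw [hlastL]
        intro h
        rw [h] at hPlen
        rw [hTlen] at hPlen
        omega
      have hRl' : pvRl (pvPi cs cut m 1) = pvRl (pvPi cs cut (m - 1) 1) ++ [1] := by
        rw [hsplitT, hPiL]
        exact pvRl_append_ne Ps P0 (pvPc cs cut m) (by rw [← hPiL]; exact hTne)
      have hAval : solution s = pvG cut 0 (pvRl (pvPi cs cut m 1)) + ((remN : Nat) : Int) := by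
        unfold solution
        simp only []
        rw [← hcs, hlen, hAcut, if_neg hL0]
        rw [if_neg (by simp; omega)]
        rw [hremInt, hmInt]
        rw [if_pos (show (((remN : Nat) : Int) ≠ 0) from by simp [hrem])]
        rw [if_neg (show ¬((((remN : Nat) : Int) == 0) = true) from by simp [hrem])]
        have hcl : m * cut ≤ ((cs.length : Nat) : Int) := by rw [← hnN]; exact hmcut
        have := pv_mainA cs cut m hc0 hcl (m - 1).toNat 1 (by omega) (by omega)
          1 [] [] 0 le_rfl (fun h => absurd h (by omega))
        have hts : (((PySem.List.slice cs (some (-((remN : Nat) : Int))) none).length : Nat) : Int) =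
            ((remN : Nat) : Int) := by
          rw [PySem.List.slice_from_neg_natCast cs remN (by omega)]
          simp only [List.length_drop]
          rw [← hnN]
          omega
        rw [List.length_append, Nat.cast_add]
        rw [this, pvMerge_one, hts]
        simp
      by_cases hpe : pvPieceN cs L (mN - 2) = pvPieceN cs L (mN - 1)
      · -- last two full blocks equal: D holds, A writes a stale "1"+word
        have hD : D_solution s := by
          rw [hDiff]
          exact ⟨hL0, Or.inr ⟨hrem, hpe⟩⟩
        have hlast : 1 < pvLast (pvRl (pvPi cs cut (m - 1) 1)) := by
          rw [hsplitA, hPcm2, hPcm1, hpe]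
          exact pvRl_last_two_eq _ _
        rw [hPiL, hRL] at hlast
        have hG : pvG cut 0 (pvRl (pvPi cs cut m 1)) =
            pvSB cut (pvRl (pvPi cs cut (m - 1) 1)) + 1 + cut := by
          rw [hRl', hPiL, hRL]
          exact pvG_append_one_last_gt cut rs r0 0 hlast
        refine ⟨fun hnD => absurd hD hnD, fun _ => ?_⟩
        rw [hAval, hBval, hG]
        omega
      · -- last two full blocks differ: A and B agree, D does not hold
        have hlast : pvLast (pvRl (pvPi cs cut (m - 1) 1)) = 1 := by
          rw [hsplitA, hPcm2, hPcm1]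
          exact pvRl_last_two_ne _ _ _ hpe
        rw [hPiL, hRL] at hlast
        have hG : pvG cut 0 (pvRl (pvPi cs cut m 1)) =
            pvSB cut (pvRl (pvPi cs cut (m - 1) 1)) := by
          rw [hRl', hPiL, hRL]
          exact pvG_append_one_last_one cut rs r0 0 hlast
        constructor
        · intro _
          rw [hAval, hBval, hG]
          omega
        · intro hD
          exfalso
          rw [hDiff] at hD
          rcases hD.2 with ⟨hz0, _⟩ | ⟨_, hne⟩
          · exact hrem hz0
          · exact hpe hne

-- ===== VERDICT (by name: the statement is the Claim_ definition above) =====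
theorem solution_spec : Claim_unchanged_solution := by
  unfold Claim_unchanged_solution
  intro s _ hpre
  unfold Spec_solution
  exact (pv_master s hpre).1
theorem solution_changed : Claim_changed_solution := by unfold Claim_changed_solution; decide
theorem solution_tight : Claim_exact_solution := by
  unfold Claim_exact_solution
  intro s _ hpre hD
  exact (pv_master s hpre).2 hD
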